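-- pv_equiv track=rewrite | github.com/lee1906068/CRF_STEEC | fpstmatch/gridroadnet.py | _waysinfo_update_cl
-- ===== SOURCE A (Python) =====
-- def _waysinfo_update_cl(edge, cl_grid_new, cl_grid_org):
--     def qurey_cl_grid_new_cl_grid_org(qurey, grid_new, grid_org):
--         for _ in zip(grid_new, grid_org):
--             if qurey in _[1]:
--                 return _[0]
--
--     from_grid_new = qurey_cl_grid_new_cl_grid_org(
--         edge["from_grid"], cl_grid_new, cl_grid_org
--     )
--     to_grid_new = qurey_cl_grid_new_cl_grid_org(
--         edge["to_grid"], cl_grid_new, cl_grid_org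
--     )
--     ignore_cl = True if from_grid_new == to_grid_new else False
--
--     return (
--         from_grid_new,
--         to_grid_new,
--         from_grid_new + "-" + to_grid_new,
--         (from_grid_new, to_grid_new),
--         ignore_cl)  # type: ignore
-- ===== SOURCE B (Python) =====
-- def _waysinfo_update_cl(edge, cl_grid_new, cl_grid_org):
--     # Build an inverted index once: value -> first grid_new whose grid_org contains it.
--     index = {}
--     for grid_new, grid_org in zip(cl_grid_new, cl_grid_org):
--         for v in grid_org:
--             index.setdefault(v, grid_new)
--
--     from_grid_new = index.get(edge["from_grid"])
--     to_grid_new = index.get(edge["to_grid"])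
--
--     return (
--         from_grid_new,
--         to_grid_new,
--         from_grid_new + "-" + to_grid_new,
--         (from_grid_new, to_grid_new),
--         from_grid_new == to_grid_new,
--     )
-- ===== Notes on version B (the rewrite author's own statement) =====
-- stated objective: alternative
-- what changed: Replaces the per-query rescan of the zipped grid lists with a single inverted-index dict built once via setdefault (first containing grid wins), from which both lookups are direct gets.
import Mathlib
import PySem

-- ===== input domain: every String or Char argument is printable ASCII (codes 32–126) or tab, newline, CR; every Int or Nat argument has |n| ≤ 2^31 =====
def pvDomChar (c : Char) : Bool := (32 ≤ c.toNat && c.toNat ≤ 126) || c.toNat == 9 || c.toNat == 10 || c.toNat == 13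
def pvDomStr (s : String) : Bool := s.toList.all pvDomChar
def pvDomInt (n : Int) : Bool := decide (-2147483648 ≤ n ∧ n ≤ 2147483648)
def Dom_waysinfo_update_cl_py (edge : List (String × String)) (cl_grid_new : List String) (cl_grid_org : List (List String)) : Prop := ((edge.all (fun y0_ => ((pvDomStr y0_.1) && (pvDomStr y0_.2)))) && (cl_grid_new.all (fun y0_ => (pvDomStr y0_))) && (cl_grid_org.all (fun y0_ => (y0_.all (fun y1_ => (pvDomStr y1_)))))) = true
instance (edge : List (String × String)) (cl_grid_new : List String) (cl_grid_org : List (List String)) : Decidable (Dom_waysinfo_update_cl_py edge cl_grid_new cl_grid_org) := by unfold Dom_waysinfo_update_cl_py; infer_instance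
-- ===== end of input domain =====

-- B replaces A's per-query scan of zip(cl_grid_new, cl_grid_org) with one inverted-index
-- dict built once by setdefault (first containing grid wins), then two direct lookups.

-- ===== PORT A =====
-- inner helper qurey_cl_grid_new_cl_grid_org: loop over zip(grid_new, grid_org),
-- return the first grid_new whose grid_org contains the query; falls off the loop = None.
def pvQureyLoop (qurey : String) : List (String × List String) → Option String
  | [] => none
  | p :: rest => if qurey ∈ p.2 then some p.1 else pvQureyLoop qurey rest

def pvQureyClGrid (qurey : String) (grid_new : List String) (grid_org : List (List String)) : Option String :=
  pvQureyLoop qurey (grid_new.zip grid_org)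

-- On inputs where Python raises (missing "from_grid"/"to_grid" key = KeyError, or an
-- unmatched query so the None + "-" concat is a TypeError) the port defaults to "";
-- exactly those inputs are excluded by Pre_ below.
def waysinfo_update_cl_py (edge : List (String × String)) (cl_grid_new : List String) (cl_grid_org : List (List String)) : String × String × String × (String × String) × Bool :=
  let from_grid_new := ((edge.lookup "from_grid").bind (fun q => pvQureyClGrid q cl_grid_new cl_grid_org)).getD ""
  let to_grid_new := ((edge.lookup "to_grid").bind (fun q => pvQureyClGrid q cl_grid_new cl_grid_org)).getD ""
  let ignore_cl := from_grid_new == to_grid_new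
  (from_grid_new, to_grid_new, from_grid_new ++ "-" ++ to_grid_new, (from_grid_new, to_grid_new), ignore_cl)

-- ===== PORT B =====
-- build the inverted index: for each (grid_new, grid_org) of the zip, setdefault every value
def pvBuildIndex (pairs : List (String × List String)) : PySem.Dict String String :=
  pairs.foldl (fun d p => p.2.foldl (fun d v => d.setdefault v p.1) d) PySem.Dict.empty

-- missing key / unmatched query would be None in Python (then TypeError); the port
-- defaults to "" there, and Pre_ excludes exactly those inputs.
def waysinfo_update_cl_py_alt (edge : List (String × String)) (cl_grid_new : List String) (cl_grid_org : List (List String)) : String × String × String × (String × String) × Bool :=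
  let index := pvBuildIndex (cl_grid_new.zip cl_grid_org)
  let from_grid_new := (index.get? ((edge.lookup "from_grid").getD "")).getD ""
  let to_grid_new := (index.get? ((edge.lookup "to_grid").getD "")).getD ""
  (from_grid_new, to_grid_new, from_grid_new ++ "-" ++ to_grid_new, (from_grid_new, to_grid_new), from_grid_new == to_grid_new)

-- ===== PRECONDITION & SPEC =====
-- true iff the optional query value is present and occurs in some grid_org of the zipped prefix
def pvFoundB (cl_grid_new : List String) (cl_grid_org : List (List String)) (q? : Option String) : Bool :=
  match q? with
  | none => false
  | some q => (cl_grid_org.take cl_grid_new.length).flatten.contains q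

-- Pre_ excludes exactly the inputs where the Python raises: a missing "from_grid"/"to_grid"
-- key (KeyError) or a grid id not found in the zipped grid collections (None, so the "-"
-- concatenation raises TypeError).
def Pre_waysinfo_update_cl_py (edge : List (String × String)) (cl_grid_new : List String) (cl_grid_org : List (List String)) : Prop :=
  pvFoundB cl_grid_new cl_grid_org (edge.lookup "from_grid") = true ∧
  pvFoundB cl_grid_new cl_grid_org (edge.lookup "to_grid") = true
instance (edge : List (String × String)) (cl_grid_new : List String) (cl_grid_org : List (List String)) : Decidable (Pre_waysinfo_update_cl_py edge cl_grid_new cl_grid_org) := by unfold Pre_waysinfo_update_cl_py; infer_instance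

def pvWitness_waysinfo_update_cl_py : (List (String × String)) × List String × List (List String) :=
  ([("from_grid", "a"), ("to_grid", "b")], ["G1", "G2"], [["a"], ["b", "c"]])

def Spec_waysinfo_update_cl_py (edge : List (String × String)) (cl_grid_new : List String) (cl_grid_org : List (List String)) (out : String × String × String × (String × String) × Bool) : Prop := out = waysinfo_update_cl_py_alt edge cl_grid_new cl_grid_org
instance (edge : List (String × String)) (cl_grid_new : List String) (cl_grid_org : List (List String)) (out : String × String × String × (String × String) × Bool) : Decidable (Spec_waysinfo_update_cl_py edge cl_grid_new cl_grid_org out) := by unfold Spec_waysinfo_update_cl_py; infer_instance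

-- ===== CLAIM (what is proved, stated in full; the proofs are below) =====
def Claim_equal_waysinfo_update_cl_py : Prop := ∀ (edge : List (String × String)) (cl_grid_new : List String) (cl_grid_org : List (List String)), Dom_waysinfo_update_cl_py edge cl_grid_new cl_grid_org → Pre_waysinfo_update_cl_py edge cl_grid_new cl_grid_org → Spec_waysinfo_update_cl_py edge cl_grid_new cl_grid_org (waysinfo_update_cl_py edge cl_grid_new cl_grid_org)

-- ===== LEMMAS AND PROOFS =====

theorem pv_get?_setdefault (d : PySem.Dict String String) (k v q : String) :
    (d.setdefault k v).get? q = (d.get? q).or (if q = k then some v else none) := by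
  unfold PySem.Dict.setdefault
  by_cases hc : d.contains k = true
  · simp only [hc, if_true]
    by_cases hq : q = k
    · subst hq
      rcases hg : d.get? q with _ | w
      · exfalso
        rw [PySem.Dict.contains_eq_isSome_get?] at hc
        simp [hg] at hc
      · simp
    · simp [hq]
  · simp only [hc]
    show Option.map _ (List.find? _ (d.items ++ [(k, v)])) = _
    rw [List.find?_append]
    rcases hf : List.find? (fun p => p.1 == q) d.items with _ | p
    · by_cases hq : q = k
      · subst hq; simp [PySem.Dict.get?, hf, List.find?]
      · have hkq : (k == q) = false := by simp [Ne.symm hq]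
        simp [PySem.Dict.get?, hf, List.find?, hq, hkq]
    · simp [PySem.Dict.get?, hf]

theorem pv_inner_loop (go : List String) (gn : String) (d : PySem.Dict String String) (q : String) :
    (go.foldl (fun d v => d.setdefault v gn) d).get? q
      = (d.get? q).or (if q ∈ go then some gn else none) := by
  induction go generalizing d with
  | nil => simp
  | cons x rest ih =>
    simp only [List.foldl_cons]
    rw [ih, pv_get?_setdefault]
    by_cases hx : q = x
    · subst hx
      rcases d.get? q with _ | w <;> simp
    · simp [hx, List.mem_cons]

theorem pv_outer_loop (pairs : List (String × List String)) (d : PySem.Dict String String) (q : String) :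
    (pairs.foldl (fun d p => p.2.foldl (fun d v => d.setdefault v p.1) d) d).get? q
      = (d.get? q).or (pvQureyLoop q pairs) := by
  induction pairs generalizing d with
  | nil => simp [pvQureyLoop]
  | cons p rest ih =>
    simp only [List.foldl_cons]
    rw [ih, pv_inner_loop, pvQureyLoop]
    by_cases hm : q ∈ p.2
    · rcases d.get? q with _ | w <;> simp [hm]
    · simp [hm]

theorem pv_index_eq_query (cl_grid_new : List String) (cl_grid_org : List (List String)) (q : String) :
    (pvBuildIndex (cl_grid_new.zip cl_grid_org)).get? q = pvQureyClGrid q cl_grid_new cl_grid_org := by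
  unfold pvBuildIndex pvQureyClGrid
  rw [pv_outer_loop]
  simp [PySem.Dict.get?_empty]

-- ===== VERDICT (by name: the statement is the Claim_ definition above) =====
theorem waysinfo_update_cl_py_spec : Claim_equal_waysinfo_update_cl_py := by
  intro edge cn co _ hpre
  unfold Spec_waysinfo_update_cl_py waysinfo_update_cl_py waysinfo_update_cl_py_alt
  obtain ⟨hf, ht⟩ := hpre
  rcases hlf : edge.lookup "from_grid" with _ | qf
  · rw [hlf] at hf; simp [pvFoundB] at hf
  · rcases hlt : edge.lookup "to_grid" with _ | qt
    · rw [hlt] at ht; simp [pvFoundB] at ht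
    · simp only [Option.getD_some, Option.bind_some, pv_index_eq_query]
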